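-- pv_equiv track=rewrite | github.com/chaitanyakcs/survey-engine | src/services/retrieval_service.py | _detect_scale_type
-- ===== SOURCE A (Python) =====
-- from typing import List, Dict, Any, Optional
--
-- def _detect_scale_type(question: Dict[str, Any], options: List[str]) -> str:
--     """
--     Detect if this is a scale question and what type
--     """
--     if len(options) >= 3:
--         # Check for numeric scales
--         numeric_options = [opt for opt in options if opt.strip().isdigit()]
--         if len(numeric_options) >= 3:
--             return f"numeric_scale_{len(numeric_options)}"
--
--         # Check for Likert scales
--         likert_keywords = ["strongly disagree", "disagree", "neutral", "agree", "strongly agree"]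
--         if any(any(keyword in str(opt).lower() for keyword in likert_keywords) for opt in options):
--             return f"likert_{len(options)}"
--
--         # Check for satisfaction scales
--         satisfaction_keywords = ["very dissatisfied", "dissatisfied", "satisfied", "very satisfied"]
--         if any(any(keyword in str(opt).lower() for keyword in satisfaction_keywords) for opt in options):
--             return f"satisfaction_{len(options)}"
--
--     return "none"
-- ===== SOURCE B (Python) =====
-- def _detect_scale_type(question, options):
--     """Single pass: count digit options and flag likert/satisfaction keywords.
--
--     Every likert keyword contains "agree" or is "neutral", and every
--     satisfaction keyword contains "satisfied", so one substring test each
--     replaces the nested keyword scans."""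
--     if len(options) < 3:
--         return "none"
--     numeric = 0
--     likert = False
--     satisfaction = False
--     for opt in options:
--         low = opt.lower()
--         if opt.strip().isdigit():
--             numeric += 1
--         if "agree" in low or "neutral" in low:
--             likert = True
--         if "satisfied" in low:
--             satisfaction = True
--     if numeric >= 3:
--         return f"numeric_scale_{numeric}"
--     if likert:
--         return f"likert_{len(options)}"
--     if satisfaction:
--         return f"satisfaction_{len(options)}"
--     return "none"
-- ===== Notes on version B (the rewrite author's own statement) =====
-- stated objective: faster
-- what changed: Replaces A's three separate scans (a filter comprehension plus two nested any-over-keywords scans) with one loop over options keeping a digit count and two flags, and collapses each keyword list to a single substring test ('agree'/'neutral' for likert, 'satisfied' for satisfaction) since every keyword contains one of those.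
import Mathlib
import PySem

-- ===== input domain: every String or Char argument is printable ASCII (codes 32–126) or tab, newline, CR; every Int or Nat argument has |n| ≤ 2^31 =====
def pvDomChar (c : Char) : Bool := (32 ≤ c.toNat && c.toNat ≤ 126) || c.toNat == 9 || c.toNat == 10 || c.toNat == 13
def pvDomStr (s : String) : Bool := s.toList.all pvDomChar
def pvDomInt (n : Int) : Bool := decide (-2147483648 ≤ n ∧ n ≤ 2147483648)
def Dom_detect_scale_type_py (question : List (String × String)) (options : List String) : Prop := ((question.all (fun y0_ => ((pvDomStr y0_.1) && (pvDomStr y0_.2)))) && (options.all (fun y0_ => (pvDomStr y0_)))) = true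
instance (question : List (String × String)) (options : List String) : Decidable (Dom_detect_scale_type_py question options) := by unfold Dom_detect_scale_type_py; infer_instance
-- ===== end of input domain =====

-- B replaces A's three separate scans with one accumulator pass and a single substring test per scale family; same results, simpler.


-- ===== PORT A =====
def pvLikertKeywords : List String :=
  ["strongly disagree", "disagree", "neutral", "agree", "strongly agree"]

def pvSatisfactionKeywords : List String :=
  ["very dissatisfied", "dissatisfied", "satisfied", "very satisfied"]

def detect_scale_type_py (question : List (String × String)) (options : List String) : String :=
  if 3 ≤ options.length then
    let numeric_options := options.filter (fun opt => PySem.Str.strIsdigit (PySem.Str.strip opt))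
    if 3 ≤ numeric_options.length then
      "numeric_scale_" ++ PySem.Int.toStr (numeric_options.length : Int)
    else if options.any (fun opt => pvLikertKeywords.any (fun k => PySem.Str.isIn k (PySem.Str.lower opt))) then
      "likert_" ++ PySem.Int.toStr (options.length : Int)
    else if options.any (fun opt => pvSatisfactionKeywords.any (fun k => PySem.Str.isIn k (PySem.Str.lower opt))) then
      "satisfaction_" ++ PySem.Int.toStr (options.length : Int)
    else "none"
  else "none"

-- ===== PORT B =====
def pvAltStep (st : Nat × Bool × Bool) (opt : String) : Nat × Bool × Bool :=
  let low := PySem.Str.lower opt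
  ((if PySem.Str.strIsdigit (PySem.Str.strip opt) then st.1 + 1 else st.1),
   (st.2.1 || (PySem.Str.isIn "agree" low || PySem.Str.isIn "neutral" low)),
   (st.2.2 || PySem.Str.isIn "satisfied" low))

def detect_scale_type_py_alt (question : List (String × String)) (options : List String) : String :=
  if options.length < 3 then "none"
  else
    let st := options.foldl pvAltStep (0, false, false)
    if 3 ≤ st.1 then "numeric_scale_" ++ PySem.Int.toStr (st.1 : Int)
    else if st.2.1 then "likert_" ++ PySem.Int.toStr (options.length : Int)
    else if st.2.2 then "satisfaction_" ++ PySem.Int.toStr (options.length : Int)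
    else "none"

-- ===== PRECONDITION & SPEC =====
def Spec_detect_scale_type_py (question : List (String × String)) (options : List String) (out : String) : Prop := out = detect_scale_type_py_alt question options
instance (question : List (String × String)) (options : List String) (out : String) : Decidable (Spec_detect_scale_type_py question options out) := by unfold Spec_detect_scale_type_py; infer_instance

-- ===== CLAIM (what is proved, stated in full; the proofs are below) =====
def Claim_equal_detect_scale_type_py : Prop := ∀ (question : List (String × String)) (options : List String), Dom_detect_scale_type_py question options → Spec_detect_scale_type_py question options (detect_scale_type_py question options)

-- ===== LEMMAS AND PROOFS =====

-- if a ⊆ b (as infix) and a is not in s, then b is not in s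
theorem pv_isIn_false_of_sub (a b s : String) (hab : a.toList <:+: b.toList)
    (ha : PySem.Str.isIn a s = false) : PySem.Str.isIn b s = false := by
  cases hb : PySem.Str.isIn b s
  · rfl
  · have h1 : b.toList <:+: s.toList := (PySem.Str.isIn_iff_infix b s).mp hb
    have h2 : PySem.Str.isIn a s = true := (PySem.Str.isIn_iff_infix a s).mpr (hab.trans h1)
    rw [ha] at h2; cases h2

theorem pv_likert_any (s : String) :
    pvLikertKeywords.any (fun k => PySem.Str.isIn k s) =
      (PySem.Str.isIn "agree" s || PySem.Str.isIn "neutral" s) := by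
  cases ha : PySem.Str.isIn "agree" s with
  | true =>
    simp only [pvLikertKeywords, List.any_cons, List.any_nil, ha, Bool.true_or, Bool.or_true]
  | false =>
    have hsd := pv_isIn_false_of_sub "agree" "strongly disagree" s (by decide) ha
    have hd := pv_isIn_false_of_sub "agree" "disagree" s (by decide) ha
    have hsa := pv_isIn_false_of_sub "agree" "strongly agree" s (by decide) ha
    simp only [pvLikertKeywords, List.any_cons, List.any_nil, ha, hsd, hd, hsa,
      Bool.false_or, Bool.or_false]

theorem pv_sat_any (s : String) :
    pvSatisfactionKeywords.any (fun k => PySem.Str.isIn k s) =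
      PySem.Str.isIn "satisfied" s := by
  cases hs : PySem.Str.isIn "satisfied" s with
  | true =>
    simp only [pvSatisfactionKeywords, List.any_cons, List.any_nil, hs, Bool.true_or, Bool.or_true]
  | false =>
    have hvd := pv_isIn_false_of_sub "satisfied" "very dissatisfied" s (by decide) hs
    have hd := pv_isIn_false_of_sub "satisfied" "dissatisfied" s (by decide) hs
    have hvs := pv_isIn_false_of_sub "satisfied" "very satisfied" s (by decide) hs
    simp only [pvSatisfactionKeywords, List.any_cons, List.any_nil, hs, hvd, hd, hvs, Bool.or_false]

theorem pv_alt_scan (opts : List String) (c : Nat) (l s : Bool) :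
    opts.foldl pvAltStep (c, l, s) =
      (c + (opts.filter (fun o => PySem.Str.strIsdigit (PySem.Str.strip o))).length,
       l || opts.any (fun o => PySem.Str.isIn "agree" (PySem.Str.lower o) || PySem.Str.isIn "neutral" (PySem.Str.lower o)),
       s || opts.any (fun o => PySem.Str.isIn "satisfied" (PySem.Str.lower o))) := by
  induction opts generalizing c l s with
  | nil => simp
  | cons x xs ih =>
    rw [List.foldl_cons, pvAltStep, ih]
    simp [List.filter_cons, Bool.or_assoc]
    split_ifs <;> simp <;> omega

-- ===== VERDICT (by name: the statement is the Claim_ definition above) =====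
theorem detect_scale_type_py_spec : Claim_equal_detect_scale_type_py := by
  intro question options _
  unfold Spec_detect_scale_type_py detect_scale_type_py detect_scale_type_py_alt
  by_cases h3 : 3 ≤ options.length
  · have hlt : ¬ options.length < 3 := by omega
    simp only [h3, hlt, if_false, if_pos, pv_alt_scan, Nat.zero_add]
    simp only [pv_likert_any, pv_sat_any, Bool.false_or]
  · have hlt : options.length < 3 := by omega
    simp [h3, hlt]
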